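-- pv_equiv track=rewrite | github.com/ConorODonovan/Online-Courses | Udemy/Python/Data Structures and Algorithms/Sorting/check.py | check
-- ===== SOURCE A (Python) =====
-- def check(a, b, n):
--     for i in range(0, len(a)):
--         j = i
--         k = i
--
--         posIntCountLeft = 0
--         posIntCountRight = 0
--
--         while j > 0:
--             j -= 1
--             if a[j] > 0:
--                 posIntCountLeft += 1
--
--         while k < len(a) - 1:
--             k += 1
--             if a[k] > 0:
--                 posIntCountRight += 1
--
--         b.append(posIntCountLeft - posIntCountRight)
--
--     return b
-- ===== SOURCE B (Python) =====
-- def check(a, b, n):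
--     total = 0
--     for x in a:
--         total += 1 if x > 0 else 0
--     left = 0
--     for x in a:
--         pos = 1 if x > 0 else 0
--         b.append(left - (total - left - pos))
--         left += pos
--     return b
-- ===== Notes on version B (the rewrite author's own statement) =====
-- stated objective: faster
-- what changed: Replaces the per-index inner while-loops (rescanning left and right of each position) with one pre-computed total of positives and a single pass maintaining the running left count, deriving the right count as total - left - current.
import Mathlib
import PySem

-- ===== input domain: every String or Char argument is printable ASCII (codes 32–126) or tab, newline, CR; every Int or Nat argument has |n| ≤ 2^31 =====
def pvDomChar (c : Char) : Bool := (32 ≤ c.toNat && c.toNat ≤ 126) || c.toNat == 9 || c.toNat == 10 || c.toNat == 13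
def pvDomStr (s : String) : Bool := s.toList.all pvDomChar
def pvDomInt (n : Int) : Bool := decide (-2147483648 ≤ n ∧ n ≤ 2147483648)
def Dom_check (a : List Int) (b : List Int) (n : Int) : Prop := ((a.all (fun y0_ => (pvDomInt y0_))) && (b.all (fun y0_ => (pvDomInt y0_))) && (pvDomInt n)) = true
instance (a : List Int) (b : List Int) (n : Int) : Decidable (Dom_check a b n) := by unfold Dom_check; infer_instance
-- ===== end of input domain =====

-- B replaces A's per-index left/right rescans by one total-positives pass plus a single
-- running-count pass (measured asymptotically faster). A appends to b in place; the
-- equivalence is about the returned list (B performs the same appends).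

-- ===== PORT A =====
-- inner 'while j > 0' loop of A: counts positives at indices j-1, …, 0 (index always in range)
def whileLeft (a : List Int) : Nat → Int
  | 0 => 0
  | j + 1 => whileLeft a j + (if a.getD j 0 > 0 then 1 else 0)

-- inner 'while k < len(a) - 1' loop of A: counts positives at indices k+1, …, len-1
def whileRight (a : List Int) (k : Nat) : Int :=
  if k < a.length - 1 then
    (if a.getD (k + 1) 0 > 0 then 1 else 0) + whileRight a (k + 1)
  else 0
termination_by a.length - k

def check (a : List Int) (b : List Int) (n : Int) : List Int :=
  (List.range a.length).foldl
    (fun acc i => acc ++ [whileLeft a i - whileRight a i]) b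

-- ===== PORT B =====
def posCount (l : List Int) : Int :=
  l.foldl (fun s x => s + (if x > 0 then 1 else 0)) 0

def check_alt (a : List Int) (b : List Int) (n : Int) : List Int :=
  let total := posCount a
  (a.foldl
    (fun (s : List Int × Int) x =>
      let pos : Int := if x > 0 then 1 else 0
      (s.1 ++ [s.2 - (total - s.2 - pos)], s.2 + pos))
    (b, 0)).1

-- ===== PRECONDITION & SPEC =====
def Spec_check (a : List Int) (b : List Int) (n : Int) (out : List Int) : Prop := out = check_alt a b n
instance (a : List Int) (b : List Int) (n : Int) (out : List Int) : Decidable (Spec_check a b n out) := by unfold Spec_check; infer_instance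

-- ===== CLAIM (what is proved, stated in full; the proofs are below) =====
def Claim_equal_check : Prop := ∀ (a : List Int) (b : List Int) (n : Int), Dom_check a b n → Spec_check a b n (check a b n)

-- ===== LEMMAS AND PROOFS =====

-- spec-level: B's output list, written structurally
def G (total left : Int) : List Int → List Int
  | [] => []
  | x :: xs => (left - (total - left - (if x > 0 then 1 else 0))) :: G total (left + (if x > 0 then 1 else 0)) xs

theorem posCount_go (l : List Int) (s : Int) :
    l.foldl (fun s x => s + (if x > 0 then 1 else 0)) s = s + posCount l := by
  induction l generalizing s with
  | nil => simp [posCount]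
  | cons x xs ih =>
    show List.foldl _ (s + (if x > 0 then 1 else 0)) xs = _
    rw [ih]
    have : posCount (x :: xs) = (0 : Int) + (if x > 0 then 1 else 0) + posCount xs := by
      show List.foldl _ ((0 : Int) + (if x > 0 then 1 else 0)) xs = _
      rw [ih]
    rw [this]; ring

theorem posCount_cons (x : Int) (xs : List Int) :
    posCount (x :: xs) = (if x > 0 then 1 else 0) + posCount xs := by
  show List.foldl _ ((0 : Int) + (if x > 0 then 1 else 0)) xs = _
  rw [posCount_go]; ring

theorem posCount_append (l₁ l₂ : List Int) :
    posCount (l₁ ++ l₂) = posCount l₁ + posCount l₂ := by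
  induction l₁ with
  | nil => simp [posCount]
  | cons x xs ih => simp [posCount_cons, ih]; ring

theorem G_length (total left : Int) (l : List Int) : (G total left l).length = l.length := by
  induction l generalizing left with
  | nil => rfl
  | cons x xs ih => simp [G, ih]

theorem B_loop (total : Int) (l acc : List Int) (left : Int) :
    (l.foldl
      (fun (s : List Int × Int) x =>
        (s.1 ++ [s.2 - (total - s.2 - (if x > 0 then 1 else 0))], s.2 + (if x > 0 then 1 else 0)))
      (acc, left)).1 = acc ++ G total left l := by
  induction l generalizing acc left with
  | nil => simp [G]
  | cons x xs ih => simp [List.foldl, G, ih]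

theorem G_get (total : Int) (l : List Int) (i : Nat) (h : i < l.length) (left : Int) :
    (G total left l)[i]'(by rw [G_length]; exact h) =
      2 * (left + posCount (l.take i)) + (if l[i] > 0 then 1 else 0) - total := by
  induction l generalizing i left with
  | nil => simp at h
  | cons x xs ih =>
    cases i with
    | zero => simp [G, posCount]; ring
    | succ i =>
      simp only [G, List.getElem_cons_succ, List.take_succ_cons, posCount_cons]
      rw [ih i (by simpa using h)]
      ring

theorem whileLeft_eq (a : List Int) (j : Nat) (h : j ≤ a.length) :
    whileLeft a j = posCount (a.take j) := by
  induction j with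
  | zero => simp [whileLeft, posCount]
  | succ j ih =>
    have hj : j < a.length := by omega
    have ht : a.take (j + 1) = a.take j ++ [a[j]] := by
      rw [List.take_add_one, List.getElem?_eq_getElem hj]; rfl
    have hd : a.getD j 0 = a[j] := by simp [List.getD, List.getElem?_eq_getElem hj]
    rw [whileLeft, ih (by omega), ht, posCount_append, hd]
    simp [posCount]

theorem whileRight_eq (a : List Int) (k : Nat) :
    whileRight a k = posCount (a.drop (k + 1)) := by
  by_cases h : k < a.length - 1
  · have hk1 : k + 1 < a.length := by omega
    rw [whileRight]
    simp only [h, if_pos]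
    rw [whileRight_eq a (k + 1)]
    rw [List.drop_eq_getElem_cons hk1, posCount_cons]
    simp [List.getD, List.getElem?_eq_getElem hk1]
  · rw [whileRight]
    simp only [h, if_neg, not_false_iff]
    have : a.drop (k + 1) = [] := by
      apply List.drop_eq_nil_of_le; omega
    simp [this, posCount]
termination_by a.length - k

theorem A_loop (f : Nat → Int) (b : List Int) (l : List Nat) :
    l.foldl (fun acc i => acc ++ [f i]) b = b ++ l.map f := by
  induction l generalizing b with
  | nil => simp
  | cons i l ih => simp [List.foldl, ih]

theorem posCount_split (a : List Int) (i : Nat) (h : i < a.length) :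
    posCount a = posCount (a.take i) + (if a[i] > 0 then 1 else 0) + posCount (a.drop (i + 1)) := by
  conv_lhs => rw [← List.take_append_drop i a]
  rw [posCount_append, List.drop_eq_getElem_cons h, posCount_cons]
  ring

-- ===== VERDICT (by name: the statement is the Claim_ definition above) =====
theorem check_spec : Claim_equal_check := by
  intro a b n _
  unfold Spec_check check check_alt
  rw [A_loop, B_loop]
  have h : (List.range a.length).map (fun i => whileLeft a i - whileRight a i)
      = G (posCount a) 0 a := by
    apply List.ext_getElem
    · simp [G_length]
    · intro i h1 h2
      have hi : i < a.length := by simpa using h1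
      rw [List.getElem_map, List.getElem_range, G_get _ _ _ hi,
        whileLeft_eq a i (by omega), whileRight_eq a i]
      have := posCount_split a i hi
      omega
  rw [h]
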